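-- pv_equiv track=rewrite | github.com/ThalesGroup/agilab | src/agilab/main_page.py | _extract_import_guard_rebind_commands
-- ===== SOURCE A (Python) =====
-- from typing import Any, Callable, Dict, List, Optional
--
-- def _extract_import_guard_rebind_commands(message: str) -> List[tuple[str, str, str]]:
--     labels = {
--         "macOS/Linux:": ("Rebind command (macOS/Linux)", "bash"),
--         "Windows PowerShell:": ("Rebind command (Windows PowerShell)", "powershell"),
--     }
--     commands: List[tuple[str, str, str]] = []
--     lines = message.splitlines()
--     index = 0
--     while index < len(lines):
--         label = labels.get(lines[index].strip())
--         if label is None: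
--             index += 1
--             continue
--         command_lines: List[str] = []
--         index += 1
--         while index < len(lines) and lines[index].startswith("   "):
--             command_lines.append(lines[index][3:])
--             index += 1
--         if command_lines:
--             caption, language = label
--             commands.append((caption, "\n".join(command_lines).strip(), language))
--
--     if commands:
--         return commands
--
--     for line in message.splitlines():
--         command = line.strip()
--         if command.startswith("cd ") and "AGILAB_PYCHARM_ALLOW_SDK_REBIND=1" in command:
--             return [("Rebind command", command, "bash")]
--     return []
-- ===== SOURCE B (Python) =====
-- from typing import List
--
-- def _extract_import_guard_rebind_commands(message: str) -> List[tuple[str, str, str]]: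
--     labels = {
--         "macOS/Linux:": ("Rebind command (macOS/Linux)", "bash"),
--         "Windows PowerShell:": ("Rebind command (Windows PowerShell)", "powershell"),
--     }
--     commands: List[tuple[str, str, str]] = []
--     current = None
--     buffer: List[str] = []
--     for line in message.splitlines():
--         if current is not None and line.startswith("   "):
--             buffer.append(line[3:])
--             continue
--         if current is not None and buffer:
--             caption, language = current
--             commands.append((caption, "\n".join(buffer).strip(), language))
--         current = labels.get(line.strip())
--         buffer = []
--     if current is not None and buffer:
--         caption, language = current
--         commands.append((caption, "\n".join(buffer).strip(), language))
--
--     if commands: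
--         return commands
--
--     for line in message.splitlines():
--         command = line.strip()
--         if command.startswith("cd ") and "AGILAB_PYCHARM_ALLOW_SDK_REBIND=1" in command:
--             return [("Rebind command", command, "bash")]
--     return []
-- ===== Notes on version B (the rewrite author's own statement) =====
-- stated objective: alternative
-- what changed: Replaces A's index-driven outer while loop with a nested inner while that consumes indented continuation lines by a single flat pass over the lines carrying two state variables (current label and line buffer) flushed on each non-continuation line and once after the loop; the fallback cd-scan is kept.
import Mathlib
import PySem

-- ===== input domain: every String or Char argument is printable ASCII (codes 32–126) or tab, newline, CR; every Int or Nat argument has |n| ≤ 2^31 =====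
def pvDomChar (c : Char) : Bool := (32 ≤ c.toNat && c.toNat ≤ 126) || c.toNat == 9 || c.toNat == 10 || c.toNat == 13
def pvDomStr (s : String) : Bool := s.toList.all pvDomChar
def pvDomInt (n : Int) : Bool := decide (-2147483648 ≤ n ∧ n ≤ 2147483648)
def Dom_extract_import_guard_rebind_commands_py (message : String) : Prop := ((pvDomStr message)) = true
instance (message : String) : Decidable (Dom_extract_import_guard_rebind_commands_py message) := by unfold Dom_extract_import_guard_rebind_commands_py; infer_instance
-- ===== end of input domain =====

-- B replaces A's index-driven while loop with nested indented-block scan by one flat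
-- fold over the lines carrying (current label, buffer) state; same cost, different decomposition.

-- ===== PORT A =====
-- the two-entry `labels` dict lookup labels.get(line.strip()) (shared by the two Pythons verbatim)
def pvLabelOf (s : String) : Option (String × String) :=
  if s = "macOS/Linux:" then some ("Rebind command (macOS/Linux)", "bash")
  else if s = "Windows PowerShell:" then some ("Rebind command (Windows PowerShell)", "powershell")
  else none

-- the final fallback `for line in message.splitlines(): …` (textually identical in A and B)
def pvFallback : List String → List (String × String × String)
  | [] => []
  | l :: rest =>
    let command := PySem.Str.strip l
    if PySem.Str.startswith command "cd " && PySem.Str.isIn "AGILAB_PYCHARM_ALLOW_SDK_REBIND=1" command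
    then [("Rebind command", command, "bash")]
    else pvFallback rest

-- A's inner `while index < len(lines) and lines[index].startswith("   ")`:
-- returns (the collected command_lines, the remaining lines)
def pvCollectA : List String → List String × List String
  | [] => ([], [])
  | l :: rest =>
    if PySem.Str.startswith l "   " then
      ((PySem.Str.slice l (some 3) none) :: (pvCollectA rest).1, (pvCollectA rest).2)
    else ([], l :: rest)

theorem pvCollectA_snd_length : ∀ ls : List String, (pvCollectA ls).2.length ≤ ls.length := by
  intro ls
  induction ls with
  | nil => simp [pvCollectA]
  | cons l rest ih =>
    simp only [pvCollectA]
    split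
    · simpa using Nat.le_succ_of_le ih
    · simp

-- A's outer `while index < len(lines)` loop
def pvLoopA : List String → List (String × String × String) → List (String × String × String)
  | [], acc => acc
  | l :: rest, acc =>
    match pvLabelOf (PySem.Str.strip l) with
    | none => pvLoopA rest acc
    | some (cap, lang) =>
      pvLoopA (pvCollectA rest).2
        (if (pvCollectA rest).1 ≠ [] then
          acc ++ [(cap, PySem.Str.strip (PySem.Str.join "\n" (pvCollectA rest).1), lang)]
         else acc)
termination_by ls _ => ls.length
decreasing_by
  · simp
  · have := pvCollectA_snd_length rest
    simp
    omega

def extract_import_guard_rebind_commands_py (message : String) : List (String × String × String) :=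
  let lines := PySem.Str.splitlines message
  let commands := pvLoopA lines []
  if commands ≠ [] then commands else pvFallback lines

-- ===== PORT B =====
-- flush of a pending block: `if current is not None and buffer: commands.append(…)`
def pvFlushB (acc : List (String × String × String)) (cur : Option (String × String))
    (buf : List String) : List (String × String × String) :=
  match cur with
  | some (cap, lang) =>
    if buf ≠ [] then acc ++ [(cap, PySem.Str.strip (PySem.Str.join "\n" buf), lang)] else acc
  | none => acc

-- one iteration of B's flat for-loop over the lines, state = (commands, current, buffer)
def pvStepB (st : List (String × String × String) × Option (String × String) × List String)
    (line : String) : List (String × String × String) × Option (String × String) × List String :=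
  match st with
  | (acc, some cl, buf) =>
    if PySem.Str.startswith line "   " then
      (acc, some cl, buf ++ [PySem.Str.slice line (some 3) none])
    else
      (pvFlushB acc (some cl) buf, pvLabelOf (PySem.Str.strip line), ([] : List String))
  | (acc, none, _) => (acc, pvLabelOf (PySem.Str.strip line), ([] : List String))

def extract_import_guard_rebind_commands_py_alt (message : String) : List (String × String × String) :=
  let lines := PySem.Str.splitlines message
  let st := lines.foldl pvStepB ([], none, [])
  let commands := pvFlushB st.1 st.2.1 st.2.2
  if commands ≠ [] then commands else pvFallback lines

-- ===== PRECONDITION & SPEC =====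
def Spec_extract_import_guard_rebind_commands_py (message : String) (out : List (String × String × String)) : Prop := out = extract_import_guard_rebind_commands_py_alt message
instance (message : String) (out : List (String × String × String)) : Decidable (Spec_extract_import_guard_rebind_commands_py message out) := by unfold Spec_extract_import_guard_rebind_commands_py; infer_instance

-- ===== CLAIM (what is proved, stated in full; the proofs are below) =====
def Claim_equal_extract_import_guard_rebind_commands_py : Prop := ∀ (message : String), Dom_extract_import_guard_rebind_commands_py message → Spec_extract_import_guard_rebind_commands_py message (extract_import_guard_rebind_commands_py message)

-- ===== LEMMAS AND PROOFS =====

-- B's loop followed by the final flush, as a function of the start state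
def pvRunB (ls : List String)
    (st : List (String × String × String) × Option (String × String) × List String) :
    List (String × String × String) :=
  let r := ls.foldl pvStepB st
  pvFlushB r.1 r.2.1 r.2.2

-- inside a block, B's fold consumes exactly the lines A's inner while collects
theorem pvStepB_none (acc : List (String × String × String)) (buf : List String) (line : String) :
    pvStepB (acc, none, buf) line = (acc, pvLabelOf (PySem.Str.strip line), []) := rfl

theorem pvStepB_cont (acc : List (String × String × String)) (cl : String × String)
    (buf : List String) (line : String) (h : PySem.Str.startswith line "   " = true) :
    pvStepB (acc, some cl, buf) line = (acc, some cl, buf ++ [PySem.Str.slice line (some 3) none]) := by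
  simp at h
  simp [pvStepB, h]

theorem pvStepB_flush (acc : List (String × String × String)) (cl : String × String)
    (buf : List String) (line : String) (h : ¬ PySem.Str.startswith line "   " = true) :
    pvStepB (acc, some cl, buf) line = (pvFlushB acc (some cl) buf, pvLabelOf (PySem.Str.strip line), []) := by
  simp at h
  simp [pvStepB, h]

theorem pvRunB_block : ∀ (ls : List String) (cl : String × String) (acc : List (String × String × String)) (buf : List String),
    pvRunB ls (acc, some cl, buf)
      = pvRunB (pvCollectA ls).2 (pvFlushB acc (some cl) (buf ++ (pvCollectA ls).1), none, []) := by
  intro ls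
  induction ls with
  | nil => intro cl acc buf; simp [pvRunB, pvCollectA, pvFlushB]
  | cons l rest ih =>
    intro cl acc buf
    by_cases h : PySem.Str.startswith l "   " = true
    all_goals have h2 := h
    all_goals simp at h2
    · have hc : pvCollectA (l :: rest)
          = ((PySem.Str.slice l (some 3) none) :: (pvCollectA rest).1, (pvCollectA rest).2) := by
        simp [pvCollectA, h2]
      have hs : pvRunB (l :: rest) (acc, some cl, buf)
          = pvRunB rest (acc, some cl, buf ++ [PySem.Str.slice l (some 3) none]) := by
        simp only [pvRunB, List.foldl, pvStepB_cont _ _ _ _ h]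
      rw [hs, ih, hc]
      simp
    · have hc : pvCollectA (l :: rest) = ([], l :: rest) := by
        simp [pvCollectA, h2]
      rw [hc]
      simp only [pvRunB, List.foldl, pvStepB_flush _ _ _ _ h, pvStepB_none, List.append_nil]

-- B's full pass (from empty state) computes A's outer while loop
theorem pvRunB_eq_loopA : ∀ (n : Nat) (ls : List String), ls.length ≤ n →
    ∀ acc, pvRunB ls (acc, none, []) = pvLoopA ls acc := by
  intro n
  induction n with
  | zero =>
    intro ls hls acc
    have : ls = [] := List.eq_nil_of_length_eq_zero (Nat.le_zero.mp hls)
    subst this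
    simp [pvRunB, pvLoopA, pvFlushB]
  | succ n ih =>
    intro ls hls acc
    match ls with
    | [] => simp [pvRunB, pvLoopA, pvFlushB]
    | l :: rest =>
      have hr : rest.length ≤ n := by simpa using Nat.lt_succ_iff.mp (by simpa using hls)
      cases h : pvLabelOf (PySem.Str.strip l) with
      | none =>
        have : pvRunB (l :: rest) (acc, none, []) = pvRunB rest (acc, none, []) := by
          simp only [pvRunB, List.foldl, pvStepB_none, h]
        rw [this, ih rest hr acc]
        simp [pvLoopA, h]
      | some cl =>
        obtain ⟨cap, lang⟩ := cl
        have step1 : pvRunB (l :: rest) (acc, none, []) = pvRunB rest (acc, some (cap, lang), []) := by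
          simp only [pvRunB, List.foldl, pvStepB_none, h]
        rw [step1, pvRunB_block rest (cap, lang) acc []]
        have hlen : (pvCollectA rest).2.length ≤ n := le_trans (pvCollectA_snd_length rest) hr
        rw [ih _ hlen]
        simp [pvLoopA, h, pvFlushB]

-- ===== VERDICT (by name: the statement is the Claim_ definition above) =====
theorem extract_import_guard_rebind_commands_py_spec : Claim_equal_extract_import_guard_rebind_commands_py := by
  intro message _
  unfold Spec_extract_import_guard_rebind_commands_py
  unfold extract_import_guard_rebind_commands_py extract_import_guard_rebind_commands_py_alt
  have h := pvRunB_eq_loopA (PySem.Str.splitlines message).length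
      (PySem.Str.splitlines message) le_rfl []
  simp only [pvRunB] at h
  simp only []
  rw [← h]
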